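-- pv_equiv track=rewrite | github.com/ARYANK-08/Dukaan.ai | regloguser/views.py | distribute_products_across_shelves
-- ===== SOURCE A (Python) =====
-- def distribute_products_across_shelves(popular_products, num_shelves, products_per_shelf):
--     shelves = {}
--     assigned_products = set()  # Track assigned products to avoid duplicates
--
--     for i in range(num_shelves):
--         start_idx = i * products_per_shelf
--         end_idx = (i + 1) * products_per_shelf
--         if i == num_shelves - 1:  # Last shelf may have fewer products
--             end_idx = len(popular_products)
--         shelf_products = []
--         for product in popular_products[start_idx:end_idx]:
--             if product not in assigned_products:
--                 shelf_products.append(product)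
--                 assigned_products.add(product)
--         shelves[f"Shelf {i+1}"] = shelf_products
--
--     return shelves
-- ===== SOURCE B (Python) =====
-- def distribute_products_across_shelves(popular_products, num_shelves, products_per_shelf):
--     shelves = {f"Shelf {i + 1}": [] for i in range(num_shelves)}
--     assigned = set()
--     if num_shelves > 0:
--         last = num_shelves - 1
--         for idx, product in enumerate(popular_products):
--             if product in assigned:
--                 continue
--             assigned.add(product)
--             shelf = last if products_per_shelf <= 0 else min(idx // products_per_shelf, last)
--             shelves[f"Shelf {shelf + 1}"].append(product)
--     return shelves
-- ===== Notes on version B (the rewrite author's own statement) =====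
-- stated objective: alternative
-- what changed: replaces A's per-shelf slicing loop (one slice + inner dedup scan per shelf) by pre-creating all shelves empty and making a single enumerate pass that computes each product's shelf index as min(idx // products_per_shelf, num_shelves - 1), with non-positive capacities routed to the last shelf
-- intended difference: On negative products_per_shelf with at least two shelves and more products than |products_per_shelf|, A's negative slice indices accidentally put the first len+pps products on Shelf 1 and only the tail on the last shelf; B treats a non-positive capacity uniformly by routing all products to the last shelf, the same rule A itself exhibits for products_per_shelf == 0. — e.g. on distribute_products_across_shelves(["a", "b"], 2, -1): A returns [("Shelf 1", ["a"]), ("Shelf 2", ["b"])], B returns [("Shelf 1", []), ("Shelf 2", ["a", "b"])]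
import Mathlib
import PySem

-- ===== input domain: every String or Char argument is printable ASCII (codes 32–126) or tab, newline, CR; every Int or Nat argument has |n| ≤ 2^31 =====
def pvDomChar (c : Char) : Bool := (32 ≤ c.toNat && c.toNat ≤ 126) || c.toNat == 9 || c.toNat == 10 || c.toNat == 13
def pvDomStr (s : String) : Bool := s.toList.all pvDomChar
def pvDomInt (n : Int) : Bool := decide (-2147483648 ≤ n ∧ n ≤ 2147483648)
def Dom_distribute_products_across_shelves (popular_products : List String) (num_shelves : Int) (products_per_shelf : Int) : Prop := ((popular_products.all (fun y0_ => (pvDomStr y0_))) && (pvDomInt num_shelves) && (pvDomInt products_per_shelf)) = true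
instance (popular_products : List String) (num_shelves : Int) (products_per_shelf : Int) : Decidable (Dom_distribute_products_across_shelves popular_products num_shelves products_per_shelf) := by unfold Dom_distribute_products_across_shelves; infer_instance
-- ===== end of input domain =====

-- B replaces A's per-shelf slicing loop by pre-created empty shelves plus one enumerate pass
-- computing each product's shelf index directly (alternative decomposition, same cost).
-- On negative products_per_shelf (with ≥ 2 shelves and enough products) A's negative slice
-- indices scatter products accidentally; B routes them all to the last shelf (see D_ below).


-- ===== PORT A =====
-- inner loop body: 'if product not in assigned_products: shelf_products.append(product); assigned_products.add(product)'
def pvAInner (acc : List String × PySem.Set String) (product : String) : List String × PySem.Set String :=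
  if PySem.Set.contains acc.2 product then acc
  else (acc.1 ++ [product], PySem.Set.add acc.2 product)

-- outer loop body over i in range(num_shelves)
def pvAShelf (popular_products : List String) (num_shelves products_per_shelf : Int)
    (st : PySem.Dict String (List String) × PySem.Set String) (i : Int) :
    PySem.Dict String (List String) × PySem.Set String :=
  let start_idx := i * products_per_shelf
  let end_idx := (i + 1) * products_per_shelf
  let end_idx := if i == num_shelves - 1 then PySem.List.len popular_products else end_idx
  let r := (PySem.List.slice popular_products (some start_idx) (some end_idx)).foldl pvAInner ([], st.2)
  (st.1.insert ("Shelf " ++ PySem.Int.toStr (i + 1)) r.1, r.2)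

def distribute_products_across_shelves (popular_products : List String) (num_shelves : Int) (products_per_shelf : Int) : List (String × List String) :=
  ((PySem.List.pyRange 0 num_shelves 1).foldl
      (pvAShelf popular_products num_shelves products_per_shelf)
      (PySem.Dict.empty, PySem.Set.empty)).1.items

-- ===== PORT B =====
-- loop body over (idx, product) in enumerate(popular_products)
def pvBStep (num_shelves products_per_shelf : Int)
    (st : PySem.Dict String (List String) × PySem.Set String) (p : Int × String) :
    PySem.Dict String (List String) × PySem.Set String :=
  if PySem.Set.contains st.2 p.2 then st
  else
    let shelf := if products_per_shelf ≤ 0 then num_shelves - 1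
                 else min (PySem.Int.floordiv p.1 products_per_shelf) (num_shelves - 1)
    (st.1.modify ("Shelf " ++ PySem.Int.toStr (shelf + 1)) [] (fun l => l ++ [p.2]),
     PySem.Set.add st.2 p.2)

def distribute_products_across_shelves_alt (popular_products : List String) (num_shelves : Int) (products_per_shelf : Int) : List (String × List String) :=
  let shelves : PySem.Dict String (List String) :=
    (PySem.List.pyRange 0 num_shelves 1).foldl
      (fun d i => d.insert ("Shelf " ++ PySem.Int.toStr (i + 1)) ([] : List String)) PySem.Dict.empty
  (if 0 < num_shelves then
      (PySem.List.enumerate popular_products).foldl (pvBStep num_shelves products_per_shelf)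
        (shelves, PySem.Set.empty)
    else (shelves, PySem.Set.empty)).1.items

-- ===== PRECONDITION & SPEC =====
-- On negative products_per_shelf with at least two shelves and more products than |products_per_shelf|,
-- A's negative slice indices accidentally put the first len+pps products on Shelf 1 and only the tail on the
-- last shelf; B treats a non-positive capacity uniformly by routing all products to the last shelf — the
-- same rule A itself exhibits for products_per_shelf == 0.
def D_distribute_products_across_shelves (popular_products : List String) (num_shelves : Int) (products_per_shelf : Int) : Prop :=
  products_per_shelf < 0 ∧ 2 ≤ num_shelves ∧ 0 < (popular_products.length : Int) + products_per_shelf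
instance (popular_products : List String) (num_shelves : Int) (products_per_shelf : Int) : Decidable (D_distribute_products_across_shelves popular_products num_shelves products_per_shelf) := by unfold D_distribute_products_across_shelves; infer_instance

def Spec_distribute_products_across_shelves (popular_products : List String) (num_shelves : Int) (products_per_shelf : Int) (out : List (String × List String)) : Prop := ¬ D_distribute_products_across_shelves popular_products num_shelves products_per_shelf → out = distribute_products_across_shelves_alt popular_products num_shelves products_per_shelf
instance (popular_products : List String) (num_shelves : Int) (products_per_shelf : Int) (out : List (String × List String)) : Decidable (Spec_distribute_products_across_shelves popular_products num_shelves products_per_shelf out) := by unfold Spec_distribute_products_across_shelves; infer_instance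

def pvDiffWitness_distribute_products_across_shelves : List String × Int × Int := (["a", "b"], 2, -1)
def pvDiffWitnessOut_distribute_products_across_shelves : (List (String × List String)) × (List (String × List String)) :=
  ([("Shelf 1", ["a"]), ("Shelf 2", ["b"])], [("Shelf 1", []), ("Shelf 2", ["a", "b"])])

-- ===== CLAIM (what is proved, stated in full; the proofs are below) =====
def Claim_unchanged_distribute_products_across_shelves : Prop := ∀ (popular_products : List String) (num_shelves : Int) (products_per_shelf : Int), Dom_distribute_products_across_shelves popular_products num_shelves products_per_shelf → Spec_distribute_products_across_shelves popular_products num_shelves products_per_shelf (distribute_products_across_shelves popular_products num_shelves products_per_shelf)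
def Claim_changed_distribute_products_across_shelves : Prop := Dom_distribute_products_across_shelves (pvDiffWitness_distribute_products_across_shelves.1) (pvDiffWitness_distribute_products_across_shelves.2.1) (pvDiffWitness_distribute_products_across_shelves.2.2) ∧ D_distribute_products_across_shelves (pvDiffWitness_distribute_products_across_shelves.1) (pvDiffWitness_distribute_products_across_shelves.2.1) (pvDiffWitness_distribute_products_across_shelves.2.2) ∧ distribute_products_across_shelves (pvDiffWitness_distribute_products_across_shelves.1) (pvDiffWitness_distribute_products_across_shelves.2.1) (pvDiffWitness_distribute_products_across_shelves.2.2) = pvDiffWitnessOut_distribute_products_across_shelves.1 ∧ distribute_products_across_shelves_alt (pvDiffWitness_distribute_products_across_shelves.1) (pvDiffWitness_distribute_products_across_shelves.2.1) (pvDiffWitness_distribute_products_across_shelves.2.2) = pvDiffWitnessOut_distribute_products_across_shelves.2 ∧ pvDiffWitnessOut_distribute_products_across_shelves.1 ≠ pvDiffWitnessOut_distribute_products_across_shelves.2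
def Claim_exact_distribute_products_across_shelves : Prop := ∀ (popular_products : List String) (num_shelves : Int) (products_per_shelf : Int), Dom_distribute_products_across_shelves popular_products num_shelves products_per_shelf → D_distribute_products_across_shelves popular_products num_shelves products_per_shelf → distribute_products_across_shelves popular_products num_shelves products_per_shelf ≠ distribute_products_across_shelves_alt popular_products num_shelves products_per_shelf

-- ===== LEMMAS AND PROOFS =====

-- the shelf label, and the "pre-create empty shelves" fold of B
def pvKey (i : Int) : String := "Shelf " ++ PySem.Int.toStr (i + 1)
def pvE (D : PySem.Dict String (List String)) (r : List Int) : PySem.Dict String (List String) :=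
  r.foldl (fun d i => d.insert (pvKey i) ([] : List String)) D

lemma pvCore_append : ∀ (f n : ℕ) (l : List Char), Nat.toDigitsCore 10 f n l = Nat.toDigitsCore 10 f n [] ++ l := by
  intro f
  induction f with
  | zero => intro n l; simp [Nat.toDigitsCore]
  | succ f ih =>
    intro n l
    simp only [Nat.toDigitsCore]
    by_cases h : n / 10 = 0
    · simp [h]
    · simp only [h, if_false]
      rw [ih (n / 10) (Nat.digitChar (n % 10) :: l), ih (n / 10) [Nat.digitChar (n % 10)]]
      simp

def pvVal (cs : List Char) : ℕ := cs.foldl (fun a c => a * 10 + (c.toNat - 48)) 0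

lemma pvVal_append (cs : List Char) (c : Char) : pvVal (cs ++ [c]) = pvVal cs * 10 + (c.toNat - 48) := by
  simp [pvVal, List.foldl_append]

lemma pvDigitChar_toNat (m : ℕ) (h : m < 10) : (Nat.digitChar m).toNat = m + 48 := by
  interval_cases m <;> rfl

lemma pvVal_core : ∀ (f n : ℕ), n < f → pvVal (Nat.toDigitsCore 10 f n []) = n := by
  intro f
  induction f with
  | zero => omega
  | succ f ih =>
    intro n hn
    simp only [Nat.toDigitsCore]
    by_cases h : n / 10 = 0
    · simp only [h, if_true]
      have h10 : n < 10 := by omega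
      simp [pvVal, pvDigitChar_toNat _ (Nat.mod_lt _ (by norm_num))]
      omega
    · simp only [h, if_false]
      rw [pvCore_append, pvVal_append, ih (n / 10) (by omega), pvDigitChar_toNat _ (Nat.mod_lt _ (by norm_num))]
      omega

lemma pvToChars_inj {a b : Int} (ha : 0 ≤ a) (hb : 0 ≤ b)
    (h : PySem.Int.toChars a = PySem.Int.toChars b) : a = b := by
  simp only [PySem.Int.toChars, if_neg (not_lt.mpr ha), if_neg (not_lt.mpr hb)] at h
  have h1 := pvVal_core (a.toNat + 1) a.toNat (by omega)
  have h2 := pvVal_core (b.toNat + 1) b.toNat (by omega)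
  unfold Nat.toDigits at h
  rw [h] at h1
  rw [h1] at h2
  omega

lemma pvKey_inj {i j : Int} (hi : 0 ≤ i) (hj : 0 ≤ j) (h : pvKey i = pvKey j) : i = j := by
  unfold pvKey at h
  have h2 := congrArg String.toList h
  rw [String.toList_append, String.toList_append, PySem.Int.toList_toStr, PySem.Int.toList_toStr] at h2
  have h3 := List.append_cancel_left h2
  have := pvToChars_inj (by omega) (by omega) h3
  omega

lemma pvGet?_foldl_insert (r : List Int) : ∀ (D : PySem.Dict String (List String)) (k : String),
    (∀ i ∈ r, pvKey i ≠ k) → (pvE D r).get? k = D.get? k := by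
  induction r with
  | nil => intro D k _; rfl
  | cons i r ih =>
    intro D k h
    show (pvE (D.insert (pvKey i) []) r).get? k = _
    rw [ih _ k (fun j hj => h j (List.mem_cons_of_mem _ hj)), PySem.Dict.get?_insert]
    rw [if_neg (fun he => h i (List.mem_cons_self) he.symm)]

lemma pvInsert_self_eq {d : PySem.Dict String (List String)} {k : String} {v : List String}
    (hnd : d.keys.Nodup) (h : d.get? k = some v) : d.insert k v = d := by
  have hc : d.contains k = true := by rw [PySem.Dict.contains_eq_isSome_get?, h]; rfl
  apply PySem.Dict.ext
  rw [PySem.Dict.items_insert_of_contains d v hc]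
  have hh : ∀ p ∈ d.items, (if (p.1 == k) = true then (k, v) else p) = p := by
    intro p hp
    by_cases hpk : p.1 = k
    · have h2 : d.get? p.1 = some p.2 := PySem.Dict.get?_of_mem_items d (by simpa using hp) hnd
      rw [hpk, h] at h2
      have := Option.some.inj h2
      obtain ⟨p1, p2⟩ := p
      simp_all
    · simp [hpk]
  rw [List.map_congr_left hh]; simp

lemma pvInsert_insert_comm {d : PySem.Dict String (List String)} {k k' : String}
    (hk : d.contains k = true) (hne : k' ≠ k) (v w : List String) :
    (d.insert k' w).insert k v = (d.insert k v).insert k' w := by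
  have hck : (d.insert k' w).contains k = true := by
    rw [PySem.Dict.contains_insert]; simp [hk]
  by_cases hc' : d.contains k' = true
  · have hck' : (d.insert k v).contains k' = true := by
      rw [PySem.Dict.contains_insert]; simp [hc']
    apply PySem.Dict.ext
    rw [PySem.Dict.items_insert_of_contains _ v hck,
        PySem.Dict.items_insert_of_contains _ w hc',
        PySem.Dict.items_insert_of_contains _ w hck',
        PySem.Dict.items_insert_of_contains _ v hk,
        List.map_map, List.map_map]
    apply List.map_congr_left
    intro p _
    by_cases h1 : p.1 = k' <;> by_cases h2 : p.1 = k <;>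
      simp_all [Function.comp, Ne.symm hne]
  · have hc'' : (d.insert k v).contains k' = false := by
      rw [PySem.Dict.contains_insert]
      simp [hne, hc']
    apply PySem.Dict.ext
    rw [PySem.Dict.items_insert_of_contains _ v hck,
        PySem.Dict.items_insert_of_not_contains _ w (by simpa using hc'),
        PySem.Dict.items_insert_of_not_contains _ w (by simpa using hc''),
        PySem.Dict.items_insert_of_contains _ v hk,
        List.map_append]
    simp [hne]

lemma pvE_insert_comm (r : List Int) : ∀ (d : PySem.Dict String (List String)) (k : String) (v : List String),
    d.contains k = true → (∀ i ∈ r, pvKey i ≠ k) →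
    (pvE d r).insert k v = pvE (d.insert k v) r := by
  induction r with
  | nil => intro d k v _ _; rfl
  | cons i r ih =>
    intro d k v hc h
    show (pvE (d.insert (pvKey i) []) r).insert k v = pvE ((d.insert k v).insert (pvKey i) []) r
    rw [ih _ k v (by rw [PySem.Dict.contains_insert]; simp [hc])
        (fun j hj => h j (List.mem_cons_of_mem _ hj)),
      pvInsert_insert_comm hc (h i List.mem_cons_self) v []]

lemma pvAInner_acc (xs : List String) : ∀ (a : List String) (S : PySem.Set String),
    xs.foldl pvAInner (a, S) = (a ++ (xs.foldl pvAInner ([], S)).1, (xs.foldl pvAInner ([], S)).2) := by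
  induction xs with
  | nil => intro a S; simp
  | cons x xs ih =>
    intro a S
    by_cases h : PySem.Set.contains S x
    · simp only [List.foldl_cons, pvAInner, h, if_true]
      exact ih a S
    · simp only [List.foldl_cons, pvAInner, h, Bool.false_eq_true, if_false]
      rw [ih (a ++ [x]) (PySem.Set.add S x), ih ([] ++ [x]) (PySem.Set.add S x)]
      simp

lemma pvSeg (n pps : Int) : ∀ (ps : List (Int × String)) (D : PySem.Dict String (List String))
    (S : PySem.Set String) (v : List String) (κ : String),
    D.keys.Nodup → D.get? κ = some v →
    (∀ p ∈ ps, pvKey (if pps ≤ 0 then n - 1 else min (PySem.Int.floordiv p.1 pps) (n - 1)) = κ) →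
    ps.foldl (pvBStep n pps) (D, S)
      = (D.insert κ (v ++ ((ps.map (fun p => p.2)).foldl pvAInner ([], S)).1),
         ((ps.map (fun p => p.2)).foldl pvAInner ([], S)).2) := by
  intro ps
  induction ps with
  | nil =>
    intro D S v κ hnd hv _
    simp only [List.foldl_nil, List.map_nil, List.append_nil]
    rw [pvInsert_self_eq hnd hv]
  | cons p ps ih =>
    intro D S v κ hnd hv hκ
    by_cases h : PySem.Set.contains S p.2
    · simp only [List.foldl_cons, List.map_cons, pvBStep, pvAInner, h, if_true]
      exact ih D S v κ hnd hv (fun q hq => hκ q (List.mem_cons_of_mem _ hq))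
    · have hkey : ("Shelf " ++ PySem.Int.toStr ((if pps ≤ 0 then n - 1 else min (PySem.Int.floordiv p.1 pps) (n - 1)) + 1)) = κ :=
        hκ p List.mem_cons_self
      simp only [List.foldl_cons, List.map_cons, pvBStep, pvAInner, h, Bool.false_eq_true, if_false]
      rw [show (fun l => l ++ [p.2]) = (· ++ [p.2]) from rfl]
      simp only [PySem.Dict.modify, hkey]
      rw [PySem.Dict.getD_of_get?_eq_some _ _ hv]
      rw [ih (D.insert κ (v ++ [p.2])) (PySem.Set.add S p.2) (v ++ [p.2]) κ
            (PySem.Dict.nodup_keys_insert _ _ _ hnd)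
            (PySem.Dict.get?_insert_self _ _ _)
            (fun q hq => hκ q (List.mem_cons_of_mem _ hq))]
      rw [PySem.Dict.insert_insert_self]
      rw [show ([] ++ [p.2] : List String) = [p.2] from rfl, pvAInner_acc _ [p.2] (PySem.Set.add S p.2)]
      simp

lemma pvSlice_minmax (pp : List String) {a b : Int} (ha : 0 ≤ a) (hb : 0 ≤ b) :
    PySem.List.slice pp (some a) (some b)
      = (pp.drop (min a.toNat pp.length)).take (min b.toNat pp.length - min a.toNat pp.length) := by
  rw [PySem.List.slice_toNat pp ha hb]
  rcases le_or_gt a.toNat pp.length with hle | hlt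
  · rw [min_eq_left hle, List.take_eq_take_iff]
    simp [List.length_drop]
    omega
  · have h1 : pp.drop a.toNat = [] := List.drop_eq_nil_of_le (by omega)
    have h2 : pp.drop (min a.toNat pp.length) = [] := List.drop_eq_nil_of_le (by omega)
    rw [h1, h2]
    simp

-- -- main invariant (positive capacity), the non-positive-capacity path, and assembly --
lemma pvNodup_pvE (r : List Int) (D : PySem.Dict String (List String)) (h : D.keys.Nodup) :
    (pvE D r).keys.Nodup :=
  PySem.Dict.nodup_keys_foldl_insert_key r pvKey (fun _ _ => []) D h

lemma pvMain (pp : List String) (n pps : Int) (hpps : 0 < pps) :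
    ∀ (d : Nat) (i : Int), 0 ≤ i → i < n → (n - i).toNat = d + 1 →
    ∀ (D : PySem.Dict String (List String)) (S : PySem.Set String),
    D.keys.Nodup → (∀ j, i ≤ j → j < n → D.contains (pvKey j) = false) →
    (PySem.List.pyRange i n 1).foldl (pvAShelf pp n pps) (D, S)
      = (PySem.List.enumerate (pp.drop (min (i*pps).toNat pp.length)) ((min (i*pps).toNat pp.length : Nat) : Int)).foldl
          (pvBStep n pps) (pvE D (PySem.List.pyRange i n 1), S) := by
  intro d
  induction d with
  | zero =>
    intro i hi0 hin h1 D S hnd hfresh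
    have hn : n = i + 1 := by omega
    subst hn
    have hA : (0:Int) ≤ i * pps := mul_nonneg hi0 (le_of_lt hpps)
    set m := min (i*pps).toNat pp.length with hm
    rw [PySem.List.pyRange_one_singleton]
    -- A side: one shelf, it is the last one
    have hbeq : (i == i + 1 - 1) = true := by simp
    have hslice : PySem.List.slice pp (some (i * pps)) (some (PySem.List.len pp)) = pp.drop m := by
      rw [PySem.List.len_eq, pvSlice_minmax pp hA (by positivity)]
      simp [List.take_of_length_le]
      omega
    simp only [List.foldl_cons, List.foldl_nil, pvAShelf, hbeq, if_true, hslice]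
    -- B side
    have hE : pvE D [i] = D.insert (pvKey i) [] := rfl
    rw [hE, pvSeg (i+1) pps _ _ _ [] (pvKey i)
          (PySem.Dict.nodup_keys_insert _ _ _ hnd)
          (PySem.Dict.get?_insert_self _ _ _)
          ?hk]
    · rw [PySem.List.map_snd_enumerate, PySem.Dict.insert_insert_self, List.nil_append]
      rfl
    case hk =>
      intro p hp
      rw [PySem.List.mem_enumerate_iff] at hp
      obtain ⟨k, hk, rfl⟩ := hp
      have hkL : k < pp.length - m := by simpa using hk
      have hmle : (i*pps).toNat ≤ pp.length := by omega
      have hmint : (m : Int) = i * pps := by omega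
      have hif : ¬ (pps ≤ 0) := by omega
      have hge : i + 1 - 1 ≤ PySem.Int.floordiv ((m:Int) + k) pps := by
        have h11 : (i + 1 - 1) * pps = i * pps := by ring
        rw [PySem.Int.le_floordiv_iff_mul_le hpps, h11, ← hmint]
        omega
      rw [if_neg hif, min_eq_right (by omega)]
      norm_num
  | succ d ih =>
    intro i hi0 hin h1 D S hnd hfresh
    have hlt : i < n - 1 := by omega
    have hA : (0:Int) ≤ i * pps := mul_nonneg hi0 (le_of_lt hpps)
    have hB : (i+1) * pps = i * pps + pps := by ring
    have hB0 : (0:Int) ≤ (i+1) * pps := by omega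
    set m := min (i*pps).toNat pp.length with hm
    set m' := min ((i+1)*pps).toNat pp.length with hm'
    have h2n : (i * pps).toNat ≤ ((i+1) * pps).toNat := Int.toNat_le_toNat (by omega)
    have hmm' : m ≤ m' := by rw [hm, hm']; omega
    have hm'L : m' ≤ pp.length := by omega
    -- split the range
    rw [PySem.List.pyRange_one_cons (by omega : i < n)]
    -- A step
    have hbeq : (i == n - 1) = false := by simp; omega
    have hslice : PySem.List.slice pp (some (i * pps)) (some ((i+1) * pps))
        = (pp.drop m).take (m' - m) := pvSlice_minmax pp hA hB0
    set seg := (pp.drop m).take (m' - m) with hseg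
    set r := seg.foldl pvAInner (([] : List String), S) with hr
    have hAstep : pvAShelf pp n pps (D, S) i = (D.insert (pvKey i) r.1, r.2) := by
      simp only [pvAShelf, hbeq, Bool.false_eq_true, if_false, hslice]
      rfl
    rw [List.foldl_cons, hAstep]
    -- B side: split the suffix at m'
    have hseglen : seg.length = m' - m := by
      rw [hseg, List.length_take, List.length_drop]
      omega
    have hsplit : pp.drop m = seg ++ pp.drop m' := by
      rw [hseg]
      conv_lhs => rw [← List.take_append_drop (m' - m) (pp.drop m)]
      rw [List.drop_drop, Nat.add_sub_cancel' hmm']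
    rw [hsplit, PySem.List.enumerate_append, List.foldl_append, hseglen]
    have hcast : ((m : Nat) : Int) + ((m' - m : Nat) : Int) = ((m' : Nat) : Int) := by
      omega
    rw [hcast]
    -- first block via pvSeg
    have hEeq : pvE D (i :: PySem.List.pyRange (i+1) n) = pvE (D.insert (pvKey i) []) (PySem.List.pyRange (i+1) n) := rfl
    have hne_range : ∀ j ∈ PySem.List.pyRange (i+1) n, pvKey j ≠ pvKey i := by
      intro j hj
      rw [PySem.List.mem_pyRange_one] at hj
      exact fun he => by have := pvKey_inj (by omega) hi0 he; omega
    have hget : (pvE D (i :: PySem.List.pyRange (i+1) n)).get? (pvKey i) = some [] := by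
      rw [hEeq, pvGet?_foldl_insert _ _ _ hne_range, PySem.Dict.get?_insert_self]
    have hndE : (pvE D (i :: PySem.List.pyRange (i+1) n)).keys.Nodup := pvNodup_pvE _ _ hnd
    rw [pvSeg n pps _ _ _ [] (pvKey i) hndE hget ?hk2]
    case hk2 =>
      intro p hp
      rw [PySem.List.mem_enumerate_iff] at hp
      obtain ⟨k, hk, rfl⟩ := hp
      have hkL : k < seg.length := hk
      rw [hseglen] at hkL
      have hmint : (m : Int) = i * pps := by omega
      have hm'le : (m' : Int) ≤ (i+1) * pps := by omega
      have hif : ¬ (pps ≤ 0) := by omega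
      have hdiv : PySem.Int.floordiv ((m:Int) + k) pps = i := by
        rw [PySem.Int.floordiv_eq_iff_of_pos hpps]
        constructor
        · rw [hmint] at *; omega
        · have : ((m:Int) + k) < m' := by omega
          omega
      rw [if_neg hif, hdiv, min_eq_left (by omega)]
    rw [PySem.List.map_snd_enumerate, List.nil_append, ← hr]
    -- push the insert into pvE
    have hcomm : (pvE (D.insert (pvKey i) []) (PySem.List.pyRange (i+1) n)).insert (pvKey i) r.1
        = pvE (D.insert (pvKey i) r.1) (PySem.List.pyRange (i+1) n) := by
      rw [pvE_insert_comm _ _ _ _ (PySem.Dict.contains_insert_self _ _ _) hne_range,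
          PySem.Dict.insert_insert_self]
    rw [hEeq, hcomm]
    -- recurse
    have := ih (i+1) (by omega) (by omega) (by omega) (D.insert (pvKey i) r.1) r.2
      (PySem.Dict.nodup_keys_insert _ _ _ hnd) ?fresh
    · rw [← hm'] at this
      exact this
    case fresh =>
      intro j hj hjn
      rw [PySem.Dict.contains_insert]
      have h1 : (pvKey j == pvKey i) = false := by
        simp only [beq_eq_false_iff_ne]
        exact fun he => by have := pvKey_inj (by omega) hi0 he; omega
      rw [h1, hfresh j (by omega) hjn]
      rfl

lemma pvPrefixEmpty (pp : List String) (n pps : Int) (hpps : pps ≤ 0)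
    (hside : pps = 0 ∨ (pp.length : Int) + pps ≤ 0) :
    ∀ (d : Nat) (i : Int), 0 ≤ i → i ≤ n - 1 → (n - 1 - i).toNat = d →
    ∀ (D : PySem.Dict String (List String)) (S : PySem.Set String),
    (PySem.List.pyRange i (n-1) 1).foldl (pvAShelf pp n pps) (D, S)
      = (pvE D (PySem.List.pyRange i (n-1) 1), S) := by
  intro d
  induction d with
  | zero =>
    intro i hi0 hile h1 D S
    rw [PySem.List.pyRange_one_eq_nil (by omega)]
    rfl
  | succ d ih =>
    intro i hi0 hile h1 D S
    have hlt : i < n - 1 := by omega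
    rw [PySem.List.pyRange_one_cons (by omega)]
    have hbeq : (i == n - 1) = false := by simp; omega
    have hB : (i + 1) * pps = i * pps + pps := by ring
    have hip : 0 ≤ i * (-pps) := mul_nonneg hi0 (by omega)
    rw [mul_neg] at hip
    have hclamp : PySem.List.clampIdx pp.length ((i + 1) * pps) = 0 := by
      rcases hside with hs | hs
      · simp [hs, PySem.List.clampIdx]
      · simp only [PySem.List.clampIdx]
        split_ifs <;> omega
    have hslice : PySem.List.slice pp (some (i * pps)) (some ((i + 1) * pps)) = [] := by
      apply List.eq_nil_of_length_eq_zero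
      rw [PySem.List.length_slice, hclamp]
      omega
    have hAstep : pvAShelf pp n pps (D, S) i = (D.insert (pvKey i) [], S) := by
      simp only [pvAShelf, hbeq, Bool.false_eq_true, if_false, hslice, List.foldl_nil]
      rfl
    rw [List.foldl_cons, hAstep, ih (i+1) (by omega) (by omega) (by omega)]
    rfl

theorem pv_eq_of_not_D (pp : List String) (n pps : Int)
    (h : ¬ (pps < 0 ∧ 2 ≤ n ∧ 0 < (pp.length : Int) + pps)) :
    distribute_products_across_shelves pp n pps = distribute_products_across_shelves_alt pp n pps := by
  by_cases hn : n ≤ 0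
  · simp only [distribute_products_across_shelves, distribute_products_across_shelves_alt]
    rw [PySem.List.pyRange_one_eq_nil (by omega), if_neg (by omega)]
    rfl
  · by_cases hpos : 0 < pps
    · -- positive capacity: the main invariant at i = 0
      simp only [distribute_products_across_shelves, distribute_products_across_shelves_alt]
      rw [if_pos (by omega)]
      have hE0 : (PySem.List.pyRange 0 n 1).foldl
          (fun d i => d.insert ("Shelf " ++ PySem.Int.toStr (i + 1)) ([] : List String)) PySem.Dict.empty
          = pvE PySem.Dict.empty (PySem.List.pyRange 0 n 1) := rfl
      have hmain := pvMain pp n pps hpos ((n - 0).toNat - 1) 0 (le_refl 0) (by omega) (by omega)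
        PySem.Dict.empty PySem.Set.empty (PySem.Dict.nodup_keys_empty)
        (fun j _ _ => PySem.Dict.contains_empty _)
      have hz : min ((0:Int)*pps).toNat pp.length = 0 := by simp
      rw [hz] at hmain
      simp only [List.drop_zero, Nat.cast_zero] at hmain
      rw [hE0, hmain]
    · -- non-positive capacity: everything lands on the last shelf
      have hn1 : 1 ≤ n := by omega
      have ha : (0:Int) ≤ n - 1 := by omega
      have hb : n - 1 ≤ n := by omega
      have hside : pps = 0 ∨ (pp.length : Int) + pps ≤ 0 ∨ n = 1 := by
        rcases lt_trichotomy pps 0 with hl | he | hg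
        · by_cases h2 : 2 ≤ n
          · have h3 : ¬ (0 < (pp.length : Int) + pps) := fun hp => h ⟨hl, h2, hp⟩
            right; left; omega
          · right; right; omega
        · left; exact he
        · exact absurd hg hpos
      have hsing : PySem.List.pyRange (n-1) n 1 = [n-1] := by
        have hx := PySem.List.pyRange_one_singleton (a := n - 1)
        rwa [sub_add_cancel] at hx
      simp only [distribute_products_across_shelves, distribute_products_across_shelves_alt]
      rw [if_pos (by omega)]
      rw [PySem.List.pyRange_one_append 0 (n-1) n ha hb, List.foldl_append]
      -- the B-side initial dict, split the same way
      have hEsplit : (PySem.List.pyRange 0 (n-1) 1 ++ [n-1]).foldl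
          (fun d i => d.insert ("Shelf " ++ PySem.Int.toStr (i + 1)) ([] : List String)) PySem.Dict.empty
          = (pvE PySem.Dict.empty (PySem.List.pyRange 0 (n-1) 1)).insert (pvKey (n-1)) [] := by
        rw [List.foldl_append]
        rfl
      -- A side prefix: all earlier shelves stay empty
      have hpre : (PySem.List.pyRange 0 (n-1) 1).foldl (pvAShelf pp n pps)
          (PySem.Dict.empty, PySem.Set.empty)
          = (pvE PySem.Dict.empty (PySem.List.pyRange 0 (n-1) 1), PySem.Set.empty) := by
        by_cases hone : n = 1
        · have hz : PySem.List.pyRange 0 (n-1) 1 = [] := PySem.List.pyRange_one_eq_nil (by omega)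
          rw [hz]; rfl
        · exact pvPrefixEmpty pp n pps (by omega) (by omega) (n-1).toNat 0 le_rfl (by omega) (by omega) _ _
      rw [hpre, hsing, List.foldl_cons, List.foldl_nil]
      -- the last shelf takes the whole list
      have hx0 : 0 ≤ (n-1) * (-pps) := mul_nonneg ha (by omega)
      rw [mul_neg] at hx0
      have hclamp0 : PySem.List.clampIdx pp.length ((n-1) * pps) = 0 := by
        rcases hside with hs | hs | hs
        · have h0 : (n-1) * pps = 0 := by rw [hs, mul_zero]
          simp [PySem.List.clampIdx, h0]
        · by_cases hone : n = 1
          · have h0 : (n-1) * pps = 0 := by rw [hone]; ring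
            simp [PySem.List.clampIdx, h0]
          · have hx2 : 0 ≤ (n-2) * (-pps) := mul_nonneg (by omega) (by omega)
            rw [mul_neg] at hx2
            have hle2 : (n-1) * pps = (n-2) * pps + pps := by ring
            simp only [PySem.List.clampIdx]
            split_ifs <;> omega
        · have h0 : (n-1) * pps = 0 := by rw [hs]; ring
          simp [PySem.List.clampIdx, h0]
      have hsliceF : PySem.List.slice pp (some ((n-1) * pps)) (some (PySem.List.len pp)) = pp := by
        rw [PySem.List.len_eq]
        unfold PySem.List.slice
        simp [hclamp0]
      have hbeqL : ((n-1 : Int) == n - 1) = true := by simp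
      have hAlast : pvAShelf pp n pps (pvE PySem.Dict.empty (PySem.List.pyRange 0 (n-1) 1), PySem.Set.empty) (n-1)
          = ((pvE PySem.Dict.empty (PySem.List.pyRange 0 (n-1) 1)).insert (pvKey (n-1))
                (pp.foldl pvAInner ([], PySem.Set.empty)).1,
             (pp.foldl pvAInner ([], PySem.Set.empty)).2) := by
        simp only [pvAShelf, hbeqL, if_true, hsliceF]
        rfl
      rw [hAlast, hEsplit]
      rw [pvSeg n pps (PySem.List.enumerate pp) _ _ [] (pvKey (n-1))
            (PySem.Dict.nodup_keys_insert _ _ _ (pvNodup_pvE _ _ PySem.Dict.nodup_keys_empty))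
            (PySem.Dict.get?_insert_self _ _ _)
            (fun p _ => by rw [if_pos (by omega)])]
      rw [PySem.List.map_snd_enumerate, PySem.Dict.insert_insert_self, List.nil_append]

-- -- head preservation (for the strict-difference claim inside D_) --

lemma pvHead_insert {d : PySem.Dict String (List String)} {k : String} {v : List String}
    {q : String × List String} (hq : d.items.head? = some q) (hne : q.1 ≠ k) :
    ((d.insert k v).items).head? = some q := by
  obtain ⟨t, ht⟩ : ∃ t, d.items = q :: t := by
    cases hitems : d.items with
    | nil => rw [hitems] at hq; simp at hq
    | cons a t => rw [hitems] at hq; simp at hq; exact ⟨t, by rw [hq]⟩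
  by_cases hc : d.contains k = true
  · rw [PySem.Dict.items_insert_of_contains _ _ hc, ht]
    simp [hne]
  · rw [PySem.Dict.items_insert_of_not_contains _ _ (by simpa using hc), ht]
    simp

lemma pvAHead (pp : List String) (n pps : Int) : ∀ (r : List Int) (D : PySem.Dict String (List String))
    (S : PySem.Set String) (q : String × List String),
    D.items.head? = some q → (∀ j ∈ r, pvKey j ≠ q.1) →
    ((r.foldl (pvAShelf pp n pps) (D, S)).1).items.head? = some q := by
  intro r
  induction r with
  | nil => intro D S q hq _; exact hq
  | cons j r ih =>
    intro D S q hq h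
    rw [List.foldl_cons]
    exact ih _ _ q (pvHead_insert hq (fun he => h j List.mem_cons_self he.symm))
      (fun j' hj' => h j' (List.mem_cons_of_mem _ hj'))

lemma pvBHead (n pps : Int) : ∀ (ps : List (Int × String)) (D : PySem.Dict String (List String))
    (S : PySem.Set String) (q : String × List String),
    D.items.head? = some q →
    (∀ p ∈ ps, pvKey (if pps ≤ 0 then n - 1 else min (PySem.Int.floordiv p.1 pps) (n - 1)) ≠ q.1) →
    ((ps.foldl (pvBStep n pps) (D, S)).1).items.head? = some q := by
  intro ps
  induction ps with
  | nil => intro D S q hq _; exact hq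
  | cons p ps ih =>
    intro D S q hq h
    rw [List.foldl_cons]
    by_cases hc : PySem.Set.contains S p.2 = true
    · rw [show pvBStep n pps (D, S) p = (D, S) from by unfold pvBStep; rw [if_pos hc]]
      exact ih _ _ q hq (fun p' hp' => h p' (List.mem_cons_of_mem _ hp'))
    · rw [show pvBStep n pps (D, S) p
          = (D.modify ("Shelf " ++ PySem.Int.toStr
                ((if pps ≤ 0 then n - 1 else min (PySem.Int.floordiv p.1 pps) (n - 1)) + 1)) []
                (fun l => l ++ [p.2]),
             PySem.Set.add S p.2) from by unfold pvBStep; rw [if_neg hc]]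
      exact ih _ _ q
        (pvHead_insert (d := D)
          (v := D.getD ("Shelf " ++ PySem.Int.toStr
              ((if pps ≤ 0 then n - 1 else min (PySem.Int.floordiv p.1 pps) (n - 1)) + 1)) [] ++ [p.2])
          hq (fun he => h p List.mem_cons_self he.symm))
        (fun p' hp' => h p' (List.mem_cons_of_mem _ hp'))

lemma pvEHead : ∀ (r : List Int) (D : PySem.Dict String (List String)) (q : String × List String),
    D.items.head? = some q → (∀ j ∈ r, pvKey j ≠ q.1) →
    (pvE D r).items.head? = some q := by
  intro r
  induction r with
  | nil => intro D q hq _; exact hq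
  | cons j r ih =>
    intro D q hq h
    exact ih _ q (pvHead_insert hq (fun he => h j List.mem_cons_self he.symm))
      (fun j' hj' => h j' (List.mem_cons_of_mem _ hj'))

theorem pv_ne_of_D (pp : List String) (n pps : Int)
    (h1 : pps < 0) (h2 : 2 ≤ n) (h3 : 0 < (pp.length : Int) + pps) :
    distribute_products_across_shelves pp n pps ≠ distribute_products_across_shelves_alt pp n pps := by
  intro heq
  have hkne : ∀ j : Int, 1 ≤ j → pvKey j ≠ pvKey 0 :=
    fun j hj he => by have := pvKey_inj (by omega) le_rfl he; omega
  -- A's first shelf is nonempty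
  set s0 := PySem.List.slice pp (some (0 * pps)) (some ((0 + 1) * pps)) with hs0
  have hlen : s0.length = (↑pp.length + pps).toNat := by
    rw [hs0, PySem.List.length_slice]
    have e1 : (0 + 1) * pps = pps := by ring
    have e0 : (0 : Int) * pps = 0 := by ring
    rw [e1, e0]
    simp only [PySem.List.clampIdx]
    split_ifs <;> omega
  obtain ⟨x, xs, hxs⟩ : ∃ x xs, s0 = x :: xs := by
    cases hc : s0 with
    | nil => rw [hc] at hlen; simp at hlen; omega
    | cons x xs => exact ⟨x, xs, rfl⟩
  set r0 := s0.foldl pvAInner (([] : List String), PySem.Set.empty) with hr0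
  have hr0ne : r0.1 ≠ [] := by
    rw [hr0, hxs, List.foldl_cons]
    rw [show pvAInner ([], PySem.Set.empty) x = ([x], PySem.Set.add PySem.Set.empty x) from rfl]
    rw [pvAInner_acc xs [x] _]
    simp
  -- head of A's items
  have hbeq0 : ((0 : Int) == n - 1) = false := by simp; omega
  have hA1 : pvAShelf pp n pps (PySem.Dict.empty, PySem.Set.empty) 0
      = (PySem.Dict.empty.insert (pvKey 0) r0.1, r0.2) := by
    simp only [pvAShelf, hbeq0, Bool.false_eq_true, if_false]
    rfl
  have hitems1 : (PySem.Dict.empty.insert (pvKey 0) r0.1).items = [(pvKey 0, r0.1)] := by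
    rw [PySem.Dict.items_insert_of_not_contains _ _ (PySem.Dict.contains_empty _)]
    rfl
  have hAhead : (distribute_products_across_shelves pp n pps).head? = some (pvKey 0, r0.1) := by
    unfold distribute_products_across_shelves
    rw [PySem.List.pyRange_one_cons (by omega : (0:Int) < n), List.foldl_cons, hA1]
    exact pvAHead pp n pps _ _ _ _ (by rw [hitems1]; rfl)
      (fun j hj => hkne j (by have := (PySem.List.mem_pyRange_one).mp hj; omega))
  -- head of B's items
  have hBhead : (distribute_products_across_shelves_alt pp n pps).head? = some (pvKey 0, []) := by
    simp only [distribute_products_across_shelves_alt]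
    rw [if_pos (by omega : (0:Int) < n)]
    have hEhd : ((PySem.List.pyRange 0 n 1).foldl
        (fun d i => d.insert ("Shelf " ++ PySem.Int.toStr (i + 1)) ([] : List String)) PySem.Dict.empty).items.head?
        = some (pvKey 0, []) := by
      rw [PySem.List.pyRange_one_cons (by omega : (0:Int) < n)]
      exact pvEHead (PySem.List.pyRange 1 n 1) (PySem.Dict.empty.insert (pvKey 0) []) (pvKey 0, [])
        (by rw [PySem.Dict.items_insert_of_not_contains _ _ (PySem.Dict.contains_empty _)]; rfl)
        (fun j hj => hkne j (by have := (PySem.List.mem_pyRange_one).mp hj; omega))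
    exact pvBHead n pps _ _ _ _ hEhd
      (fun p _ => by rw [if_pos (by omega : pps ≤ 0)]; exact hkne (n-1) (by omega))
  rw [heq, hBhead] at hAhead
  simp only [Option.some.injEq, Prod.mk.injEq] at hAhead
  exact hr0ne hAhead.2.symm

-- ===== VERDICT (by name: the statement is the Claim_ definition above) =====
theorem distribute_products_across_shelves_spec : Claim_unchanged_distribute_products_across_shelves := by
  intro pp n pps _
  unfold Spec_distribute_products_across_shelves D_distribute_products_across_shelves
  intro hnD
  exact pv_eq_of_not_D pp n pps hnD

theorem distribute_products_across_shelves_changed : Claim_changed_distribute_products_across_shelves := by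
  unfold Claim_changed_distribute_products_across_shelves; decide

theorem distribute_products_across_shelves_tight : Claim_exact_distribute_products_across_shelves := by
  intro pp n pps _ hD
  unfold D_distribute_products_across_shelves at hD
  exact pv_ne_of_D pp n pps hD.1 hD.2.1 hD.2.2
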